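-- pv_equiv track=rewrite | github.com/jia-zhuang/nlp-utils | tokenization.py | get_token_span
-- ===== SOURCE A (Python) =====
-- def get_token_span(span_token_indexes):
--     '''寻找第一个和最后一个不为None的数, 返回一个有效区间'''
--     i = 0
--     while span_token_indexes[i] is None:
--         i += 1
--     start = span_token_indexes[i]
--
--     i = -1
--     while span_token_indexes[i] is None:
--         i -= 1
--     end = span_token_indexes[i]
--
--     return start, end + 1  # [start, end)
-- ===== SOURCE B (Python) =====
-- def get_token_span(span_token_indexes):
--     '''寻找第一个和最后一个不为None的数, 返回一个有效区间'''
--     valid = [x for x in span_token_indexes if x is not None]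
--     return valid[0], valid[-1] + 1
-- ===== Notes on version B (the rewrite author's own statement) =====
-- stated objective: simpler
-- what changed: Replaces A's two boundary while-loop scans (forward from index 0 and backward from index -1) with one full-pass filter of the non-None values followed by first/last indexing.
import Mathlib
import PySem

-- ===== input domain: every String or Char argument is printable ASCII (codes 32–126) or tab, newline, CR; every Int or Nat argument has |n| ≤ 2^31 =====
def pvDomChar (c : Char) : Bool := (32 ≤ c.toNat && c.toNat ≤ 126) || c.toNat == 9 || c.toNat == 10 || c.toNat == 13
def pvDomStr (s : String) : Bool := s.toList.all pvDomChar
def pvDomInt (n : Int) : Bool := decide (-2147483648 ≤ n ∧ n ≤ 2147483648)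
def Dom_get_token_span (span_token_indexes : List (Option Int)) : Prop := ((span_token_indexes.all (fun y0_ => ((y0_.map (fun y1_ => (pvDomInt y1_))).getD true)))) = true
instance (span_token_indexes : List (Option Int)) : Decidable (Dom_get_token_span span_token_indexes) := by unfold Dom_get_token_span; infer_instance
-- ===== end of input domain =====

-- B replaces A's two boundary while-loop scans with a single full-pass filter of the
-- non-None values followed by first/last indexing (objective: simpler).


-- ===== PORT A =====
-- A's first while loop: walk i = 0, 1, 2, … while the element is None; stop at the
-- first non-None value (none = the index walked off the list, i.e. IndexError).
def pvScanNone : List (Option Int) → Option Int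
  | [] => none
  | none :: rest => pvScanNone rest
  | some v :: _ => some v

def get_token_span (span_token_indexes : List (Option Int)) : Int × Int :=
  -- second while loop walks i = -1, -2, … : the same scan over the reversed list
  match pvScanNone span_token_indexes, pvScanNone span_token_indexes.reverse with
  | some start, some «end» => (start, «end» + 1)
  | _, _ => (0, 0)  -- IndexError in Python; excluded by Pre_

-- ===== PORT B =====
def get_token_span_alt (span_token_indexes : List (Option Int)) : Int × Int :=
  let valid := span_token_indexes.filterMap id
  match PySem.List.pyGet? valid 0 with
  | none => (0, 0)  -- valid[0] is an IndexError in Python; excluded by Pre_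
  | some s =>
    match PySem.List.pyGet? valid (-1) with
    | none => (0, 0)  -- unreachable: valid is nonempty here
    | some e => (s, e + 1)

-- ===== PRECONDITION & SPEC =====
-- Both A and B raise IndexError exactly when the list has no non-None element.
def Pre_get_token_span (span_token_indexes : List (Option Int)) : Prop :=
  span_token_indexes.any (·.isSome) = true
instance (span_token_indexes : List (Option Int)) : Decidable (Pre_get_token_span span_token_indexes) := by unfold Pre_get_token_span; infer_instance

def pvWitness_get_token_span : List (Option Int) := [none, some 2, none, some 5]

def Spec_get_token_span (span_token_indexes : List (Option Int)) (out : Int × Int) : Prop := out = get_token_span_alt span_token_indexes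
instance (span_token_indexes : List (Option Int)) (out : Int × Int) : Decidable (Spec_get_token_span span_token_indexes out) := by unfold Spec_get_token_span; infer_instance

-- ===== CLAIM (what is proved, stated in full; the proofs are below) =====
def Claim_equal_get_token_span : Prop := ∀ (span_token_indexes : List (Option Int)), Dom_get_token_span span_token_indexes → Pre_get_token_span span_token_indexes → Spec_get_token_span span_token_indexes (get_token_span span_token_indexes)

-- ===== LEMMAS AND PROOFS =====
theorem pvScanNone_eq_head_filterMap (xs : List (Option Int)) :
    pvScanNone xs = (xs.filterMap id).head? := by
  induction xs with
  | nil => rfl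
  | cons x rest ih => cases x <;> simp [pvScanNone, ih]

-- ===== VERDICT (by name: the statement is the Claim_ definition above) =====
theorem get_token_span_spec : Claim_equal_get_token_span := by
  intro xs _ _
  unfold Spec_get_token_span get_token_span get_token_span_alt
  simp only [pvScanNone_eq_head_filterMap, List.filterMap_reverse,
    PySem.List.pyGet?_zero, PySem.List.pyGet?_neg_one, ← List.head?_eq_getElem?,
    List.head?_reverse]
  cases (List.filterMap id xs).head? <;> cases (List.filterMap id xs).getLast? <;> rfl
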